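-- pv_equiv track=rewrite | github.com/Dinesh94Singh/PythonArchivedSolutions | Companies/Microsoft/max_network_rank.py | dfs
-- ===== SOURCE A (Python) =====
-- def dfs(visited, map, j):
--     if j in visited or j not in map:
--         return 0
--     visited.add(j)
--     nodes = map[j]
--     l = len(nodes)
--     for each in nodes:
--         if each not in visited:
--             l += dfs(visited, map, each)
--     return l
-- ===== SOURCE B (Python) =====
-- def dfs(visited, map, j):
--     total = 0
--     stack = [j]
--     while stack:
--         node = stack.pop()
--         if node in visited or node not in map:
--             continue
--         visited.add(node)
--         nodes = map[node]
--         total += len(nodes)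
--         for each in reversed(nodes):
--             stack.append(each)
--     return total
-- ===== Notes on version B (the rewrite author's own statement) =====
-- stated objective: alternative
-- what changed: Replaced the recursive DFS (with an inner neighbor loop accumulating recursive results) by an iterative DFS over an explicit stack with a guard-on-pop and a single running total; visited is mutated identically.
import Mathlib
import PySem

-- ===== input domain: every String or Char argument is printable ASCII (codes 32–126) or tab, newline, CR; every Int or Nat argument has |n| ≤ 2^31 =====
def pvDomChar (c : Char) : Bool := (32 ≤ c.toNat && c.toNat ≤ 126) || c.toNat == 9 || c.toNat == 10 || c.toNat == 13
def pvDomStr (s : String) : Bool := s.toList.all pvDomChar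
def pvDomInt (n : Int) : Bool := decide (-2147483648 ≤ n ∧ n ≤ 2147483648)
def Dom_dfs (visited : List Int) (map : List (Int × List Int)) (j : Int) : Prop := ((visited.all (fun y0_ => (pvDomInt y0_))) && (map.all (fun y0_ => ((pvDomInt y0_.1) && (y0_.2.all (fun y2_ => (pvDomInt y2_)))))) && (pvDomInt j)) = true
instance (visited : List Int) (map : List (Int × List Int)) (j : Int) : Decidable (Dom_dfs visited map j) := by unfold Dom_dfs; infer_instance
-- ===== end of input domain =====

-- B replaces A's recursive DFS by an iterative explicit-stack DFS (alternative decomposition);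
-- both mutate `visited` the same way in Python, and the equivalence proved here is about the return value.

-- ===== PORT A =====
-- Recursive DFS threading the mutated `visited` set.  The Python recursion terminates
-- because every productive call adds a key of `map` to `visited`; fuel `map.length + 1`
-- bounds the recursion depth (a totality guard only, proven never to bind).
def dfsF (fuel : Nat) (vis : List Int) (map : List (Int × List Int)) (j : Int) :
    List Int × Int :=
  match fuel with
  | 0 => (vis, 0)
  | n + 1 =>
    if j ∈ vis ∨ (PySem.Dict.mk map).get? j = none then (vis, 0)
    else
      let nodes := (PySem.Dict.mk map).getD j []
      let vis1 := PySem.Set.add vis j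
      nodes.foldl (fun st each =>
        if each ∈ st.1 then st
        else
          let r := dfsF n st.1 map each
          (r.1, st.2 + r.2)) (vis1, (nodes.length : Int))

def dfs (visited : List Int) (map : List (Int × List Int)) (j : Int) : Int :=
  (dfsF (map.length + 1) visited map j).2

-- ===== PORT B =====
-- Iterative DFS.  The Lean stack keeps the TOP at the HEAD, so Python's
-- `for each in reversed(nodes): stack.append(each)` followed by `stack.pop()`
-- is exactly `nodes ++ rest`.  The while loop stops only on the empty stack;
-- fuel `totalLenB map + 1` bounds the number of pops (a totality guard only).
def totalLenB (map : List (Int × List Int)) : Nat :=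
  (map.map (fun p => p.2.length)).sum

def loopB (fuel : Nat) (vis : List Int) (map : List (Int × List Int))
    (stack : List Int) (total : Int) : Int :=
  match stack with
  | [] => total
  | node :: rest =>
    match fuel with
    | 0 => total
    | n + 1 =>
      if node ∈ vis ∨ (PySem.Dict.mk map).get? node = none then
        loopB n vis map rest total
      else
        let nodes := (PySem.Dict.mk map).getD node []
        loopB n (PySem.Set.add vis node) map (nodes ++ rest)
          (total + (nodes.length : Int))

def dfs_alt (visited : List Int) (map : List (Int × List Int)) (j : Int) : Int :=
  loopB (totalLenB map + 1) visited map [j] 0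

-- ===== PRECONDITION & SPEC =====
def Spec_dfs (visited : List Int) (map : List (Int × List Int)) (j : Int) (out : Int) : Prop := out = dfs_alt visited map j
instance (visited : List Int) (map : List (Int × List Int)) (j : Int) (out : Int) : Decidable (Spec_dfs visited map j out) := by unfold Spec_dfs; infer_instance

-- ===== CLAIM (what is proved, stated in full; the proofs are below) =====
def Claim_equal_dfs : Prop := ∀ (visited : List Int) (map : List (Int × List Int)) (j : Int), Dom_dfs visited map j → Spec_dfs visited map j (dfs visited map j)

-- ===== LEMMAS AND PROOFS =====

-- adjacency mass of the entries whose key is not yet visited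
def remS (map : List (Int × List Int)) (vis : List Int) : Nat :=
  ((map.filter (fun p => decide (p.1 ∉ vis))).map (fun p => p.2.length)).sum

-- remaining work of the stack machine: live stack entries + unvisited adjacency mass
def Bf (map : List (Int × List Int)) (vis : List Int) (stack : List Int) : Nat :=
  stack.length + remS map vis

-- unvisited keys (with multiplicity), a bound on A's remaining recursion depth
def remK (map : List (Int × List Int)) (vis : List Int) : Nat :=
  ((map.map Prod.fst).filter (fun k => decide (k ∉ vis))).length

theorem remS_cons (p : Int × List Int) (t : List (Int × List Int)) (vis : List Int) :
    remS (p :: t) vis = (if p.1 ∈ vis then 0 else p.2.length) + remS t vis := by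
  by_cases h : p.1 ∈ vis <;> simp [remS, h]

theorem remS_le (map : List (Int × List Int)) (vis : List Int) :
    remS map vis ≤ totalLenB map := by
  induction map with
  | nil => simp [remS, totalLenB]
  | cons p t ih =>
    rw [remS_cons]
    simp only [totalLenB, List.map_cons, List.sum_cons] at *
    split_ifs <;> omega

theorem remS_mono (map : List (Int × List Int)) {vis vis' : List Int}
    (h : ∀ x ∈ vis, x ∈ vis') : remS map vis' ≤ remS map vis := by
  induction map with
  | nil => simp [remS]
  | cons p t ih =>
    rw [remS_cons, remS_cons]
    by_cases hv : p.1 ∈ vis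
    · simp [hv, h _ hv]; omega
    · by_cases hv' : p.1 ∈ vis' <;> simp [hv, hv'] <;> omega

theorem remS_drop (map : List (Int × List Int)) {vis : List Int} {j : Int}
    {ns : List Int} (hj : j ∉ vis) (hget : (PySem.Dict.mk map).get? j = some ns) :
    remS map (PySem.Set.add vis j) + ns.length ≤ remS map vis := by
  induction map with
  | nil => simp [PySem.Dict.get?] at hget
  | cons p t ih =>
    rw [PySem.Dict.get?_mk_cons] at hget
    rw [remS_cons, remS_cons]
    have hadd : p.1 ∈ PySem.Set.add vis j ↔ p.1 ∈ vis ∨ p.1 = j :=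
      PySem.Set.mem_add vis j p.1
    by_cases hk : p.1 = j
    · have hns : ns = p.2 := by simp [hk] at hget; exact hget.symm
      have h1 : p.1 ∈ PySem.Set.add vis j := hadd.mpr (Or.inr hk)
      have h2 : p.1 ∉ vis := hk ▸ hj
      have h3 : remS t (PySem.Set.add vis j) ≤ remS t vis :=
        remS_mono t (fun x hx => (PySem.Set.mem_add vis j x).mpr (Or.inl hx))
      simp [h1, h2, hns]; omega
    · have hget' : (PySem.Dict.mk t).get? j = some ns := by
        simpa [show (p.1 == j) = false by simp [hk]] using hget
      have hrec := ih hget'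
      by_cases hv : p.1 ∈ vis
      · simp [hv, hadd.mpr (Or.inl hv)]; omega
      · have hna : p.1 ∉ PySem.Set.add vis j := by rw [hadd]; tauto
        simp [hv, hna]; omega

theorem filtK_cons (a : Int) (t : List Int) (vis : List Int) :
    (List.filter (fun k => decide (k ∉ vis)) (a :: t)).length
      = (if a ∈ vis then 0 else 1) + (List.filter (fun k => decide (k ∉ vis)) t).length := by
  by_cases h : a ∈ vis
  · simp [h]
  · simp [h]; omega

theorem filtK_mono (l : List Int) {vis vis' : List Int}
    (h : ∀ x ∈ vis, x ∈ vis') :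
    (l.filter (fun k => decide (k ∉ vis'))).length
      ≤ (l.filter (fun k => decide (k ∉ vis))).length := by
  induction l with
  | nil => simp
  | cons a t ih =>
    rw [filtK_cons, filtK_cons]
    by_cases hv : a ∈ vis
    · simp only [hv, h _ hv, if_true]; omega
    · by_cases hv' : a ∈ vis' <;> simp only [hv, hv', if_true, if_false] <;> omega

theorem filtK_drop {l : List Int} {vis : List Int} {j : Int}
    (hj : j ∉ vis) (hmem : j ∈ l) :
    (l.filter (fun k => decide (k ∉ PySem.Set.add vis j))).length
      < (l.filter (fun k => decide (k ∉ vis))).length := by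
  have hsub : ∀ x ∈ vis, x ∈ PySem.Set.add vis j :=
    fun x hx => (PySem.Set.mem_add vis j x).mpr (Or.inl hx)
  induction l with
  | nil => simp at hmem
  | cons a t ih =>
    rw [filtK_cons, filtK_cons]
    rcases List.mem_cons.mp hmem with h1 | h1
    · have ha : a ∉ vis := h1 ▸ hj
      have ha' : a ∈ PySem.Set.add vis j :=
        (PySem.Set.mem_add vis j a).mpr (Or.inr h1.symm)
      simp only [ha, ha', if_true, if_false]
      have := filtK_mono t hsub
      omega
    · have := ih h1
      by_cases hv : a ∈ vis
      · simp only [hv, hsub a hv, if_true]; omega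
      · by_cases hv' : a ∈ PySem.Set.add vis j <;>
          simp only [hv, hv', if_true, if_false] <;> omega

theorem remK_mono (map : List (Int × List Int)) {vis vis' : List Int}
    (h : ∀ x ∈ vis, x ∈ vis') : remK map vis' ≤ remK map vis :=
  filtK_mono _ h

theorem remK_drop (map : List (Int × List Int)) {vis : List Int} {j : Int}
    (hj : j ∉ vis) (hmem : j ∈ map.map Prod.fst) :
    remK map (PySem.Set.add vis j) < remK map vis :=
  filtK_drop hj hmem

theorem get?_some_mem_keys {map : List (Int × List Int)} {j : Int} {ns : List Int}
    (h : (PySem.Dict.mk map).get? j = some ns) : j ∈ map.map Prod.fst := by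
  induction map with
  | nil => simp [PySem.Dict.get?] at h
  | cons p t ih =>
    rw [PySem.Dict.get?_mk_cons] at h
    by_cases hk : p.1 = j
    · simp [hk]
    · have h' : (PySem.Dict.mk t).get? j = some ns := by
        simpa [show (p.1 == j) = false by simp [hk]] using h
      simp [ih h']

theorem remK_le (map : List (Int × List Int)) (vis : List Int) :
    remK map vis ≤ map.length := by
  unfold remK
  calc ((map.map Prod.fst).filter _).length ≤ (map.map Prod.fst).length :=
        List.length_filter_le _ _
    _ = map.length := List.length_map ..

-- `visited` only grows during A's recursion
theorem dfsF_mono (map : List (Int × List Int)) :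
    ∀ (n : Nat) (vis : List Int) (j x : Int), x ∈ vis → x ∈ (dfsF n vis map j).1 := by
  intro n
  induction n with
  | zero => intro vis j x hx; simpa [dfsF] using hx
  | succ n ih =>
    intro vis j x hx
    by_cases hg : j ∈ vis ∨ (PySem.Dict.mk map).get? j = none
    · simpa [dfsF, hg] using hx
    · simp only [dfsF, if_neg hg]
      have hfold : ∀ (nodes : List Int) (st : List Int × Int), x ∈ st.1 →
          x ∈ (nodes.foldl (fun st each =>
            if each ∈ st.1 then st
            else ((dfsF n st.1 map each).1, st.2 + (dfsF n st.1 map each).2)) st).1 := by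
        intro nodes
        induction nodes with
        | nil => intro st h; simpa using h
        | cons e t iht =>
          intro st h
          simp only [List.foldl_cons]
          by_cases he : e ∈ st.1
          · simp only [he, if_true]
            exact iht st h
          · simp only [he, if_false]
            exact iht _ (ih st.1 e x h)
      exact hfold _ _ ((PySem.Set.mem_add vis j x).mpr (Or.inl hx))

-- B's loop is insensitive to extra fuel above the `Bf` bound
theorem loopB_fuel_succ (map : List (Int × List Int)) :
    ∀ (f : Nat) (vis stack : List Int) (total : Int), Bf map vis stack ≤ f →
    loopB (f + 1) vis map stack total = loopB f vis map stack total := by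
  intro f
  induction f with
  | zero =>
    intro vis stack total hb
    cases stack with
    | nil => rfl
    | cons node rest => exact absurd hb (by simp [Bf])
  | succ g ih =>
    intro vis stack total hb
    cases stack with
    | nil => rfl
    | cons node rest =>
      by_cases hg : node ∈ vis ∨ (PySem.Dict.mk map).get? node = none
      · simp only [loopB, if_pos hg]
        exact ih vis rest total (by simp [Bf] at hb ⊢; omega)
      · obtain ⟨ns, hns⟩ : ∃ ns, (PySem.Dict.mk map).get? node = some ns := by
          cases h : (PySem.Dict.mk map).get? node with
          | none => exact absurd (Or.inr h) hg
          | some v => exact ⟨v, rfl⟩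
        have hnv : node ∉ vis := fun h => hg (Or.inl h)
        simp only [loopB, if_neg hg]
        rw [PySem.Dict.getD_eq_get?_getD, hns]
        have hdrop := remS_drop map hnv hns
        have hb' : Bf map (PySem.Set.add vis node) (ns ++ rest) ≤ g := by
          simp only [Bf, List.length_append, List.length_cons] at hb ⊢
          omega
        exact ih _ _ _ hb'

def loopFull (map : List (Int × List Int)) (vis stack : List Int) (total : Int) : Int :=
  loopB (Bf map vis stack) vis map stack total

theorem loopB_eq_full (map : List (Int × List Int)) :
    ∀ (f : Nat) (vis stack : List Int) (total : Int), Bf map vis stack ≤ f →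
    loopB f vis map stack total = loopFull map vis stack total := by
  intro f
  induction f with
  | zero =>
    intro vis stack total hb
    unfold loopFull
    have : Bf map vis stack = 0 := Nat.le_zero.mp hb
    rw [this]
  | succ g ih =>
    intro vis stack total hb
    rcases Nat.lt_or_ge g (Bf map vis stack) with h | h
    · have : Bf map vis stack = g + 1 := by omega
      unfold loopFull; rw [this]
    · rw [loopB_fuel_succ map g vis stack total h]
      exact ih vis stack total h

theorem loopFull_nil (map : List (Int × List Int)) (vis : List Int) (total : Int) :
    loopFull map vis [] total = total := by simp [loopFull, loopB]

theorem loopFull_skip (map : List (Int × List Int)) {vis : List Int} {node : Int}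
    (rest : List Int) (total : Int)
    (hg : node ∈ vis ∨ (PySem.Dict.mk map).get? node = none) :
    loopFull map vis (node :: rest) total = loopFull map vis rest total := by
  have hB : Bf map vis (node :: rest) = Bf map vis rest + 1 := by
    simp only [Bf, List.length_cons]; omega
  unfold loopFull
  rw [hB]
  simp only [loopB, if_pos hg]

theorem loopFull_push (map : List (Int × List Int)) {vis : List Int} {node : Int}
    {ns : List Int} (rest : List Int) (total : Int)
    (hg : ¬ (node ∈ vis ∨ (PySem.Dict.mk map).get? node = none))
    (hns : (PySem.Dict.mk map).get? node = some ns) :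
    loopFull map vis (node :: rest) total
      = loopFull map (PySem.Set.add vis node) (ns ++ rest) (total + (ns.length : Int)) := by
  have hnv : node ∉ vis := fun h => hg (Or.inl h)
  have hdrop := remS_drop map hnv hns
  conv_lhs => unfold loopFull
  have hB : Bf map vis (node :: rest) = (Bf map vis rest) + 1 := by
    simp only [Bf, List.length_cons]; omega
  rw [hB]
  simp only [loopB, if_neg hg]
  rw [PySem.Dict.getD_eq_get?_getD, hns]
  exact loopB_eq_full map _ _ _ _ (by simp only [Bf, List.length_append, List.length_cons, Option.getD_some] at *; omega)

-- MAIN SIMULATION: running B's stack machine with `j` on top of the stack is the same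
-- as running A's recursion from `j` and continuing with the rest of the stack.
theorem mainSim (map : List (Int × List Int)) :
    ∀ (n : Nat) (vis : List Int) (j : Int) (rest : List Int) (total : Int),
    remK map vis + 1 ≤ n →
    loopFull map vis (j :: rest) total
      = loopFull map (dfsF n vis map j).1 rest (total + (dfsF n vis map j).2) := by
  intro n
  induction n with
  | zero => intro vis j rest total h; omega
  | succ n ih =>
    intro vis j rest total hK
    by_cases hg : j ∈ vis ∨ (PySem.Dict.mk map).get? j = none
    · simp only [dfsF, if_pos hg, add_zero]
      exact loopFull_skip map rest total hg
    · obtain ⟨ns, hns⟩ : ∃ ns, (PySem.Dict.mk map).get? j = some ns := by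
        cases h : (PySem.Dict.mk map).get? j with
        | none => exact absurd (Or.inr h) hg
        | some v => exact ⟨v, rfl⟩
      have hnv : j ∉ vis := fun h => hg (Or.inl h)
      have hdfs : dfsF (n + 1) vis map j
          = ns.foldl (fun st each =>
              if each ∈ st.1 then st
              else ((dfsF n st.1 map each).1, st.2 + (dfsF n st.1 map each).2))
            (PySem.Set.add vis j, (ns.length : Int)) := by
        simp only [dfsF, if_neg hg]
        rw [PySem.Dict.getD_eq_get?_getD, hns]
        rfl
      rw [hdfs, loopFull_push map rest total hg hns]
      have hK1 : remK map (PySem.Set.add vis j) + 1 ≤ n := by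
        have h1 := remK_drop map hnv (get?_some_mem_keys hns)
        omega
      -- inner induction over the neighbour list / B's pushed segment
      have F : ∀ (nodes : List Int) (visI : List Int) (acc : Int)
          (rest : List Int) (total : Int), remK map visI + 1 ≤ n →
          loopFull map visI (nodes ++ rest) (total + acc)
            = loopFull map
                (nodes.foldl (fun st each =>
                  if each ∈ st.1 then st
                  else ((dfsF n st.1 map each).1, st.2 + (dfsF n st.1 map each).2))
                  (visI, acc)).1
                rest
                (total + (nodes.foldl (fun st each =>
                  if each ∈ st.1 then st
                  else ((dfsF n st.1 map each).1, st.2 + (dfsF n st.1 map each).2))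
                  (visI, acc)).2) := by
        intro nodes
        induction nodes with
        | nil => intro visI acc rest total _; rfl
        | cons e t iht =>
          intro visI acc rest total hKI
          simp only [List.foldl_cons, List.cons_append]
          by_cases he : e ∈ visI
          · rw [loopFull_skip map (t ++ rest) (total + acc) (Or.inl he)]
            simp only [he, if_true]
            exact iht visI acc rest total hKI
          · simp only [he, if_false]
            rw [ih visI e (t ++ rest) (total + acc) hKI]
            have hsub : ∀ x ∈ visI, x ∈ (dfsF n visI map e).1 := dfsF_mono map n visI e
            have hK2 : remK map (dfsF n visI map e).1 + 1 ≤ n :=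
              le_trans (by have := remK_mono map hsub; omega) hKI
            have := iht (dfsF n visI map e).1 (acc + (dfsF n visI map e).2) rest total hK2
            rw [← add_assoc] at this
            exact this
      exact F ns (PySem.Set.add vis j) ((ns.length : Int)) rest total hK1

theorem dfs_spec_main (visited : List Int) (map : List (Int × List Int)) (j : Int) :
    dfs visited map j = dfs_alt visited map j := by
  unfold dfs dfs_alt
  have h1 : Bf map visited [j] ≤ totalLenB map + 1 := by
    have := remS_le map visited
    simp only [Bf, List.length_cons, List.length_nil]
    omega
  rw [loopB_eq_full map _ _ _ _ h1]
  have hK : remK map visited + 1 ≤ map.length + 1 := by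
    have := remK_le map visited
    omega
  rw [mainSim map (map.length + 1) visited j [] 0 hK, loopFull_nil, zero_add]

-- ===== VERDICT (by name: the statement is the Claim_ definition above) =====
theorem dfs_spec : Claim_equal_dfs := by
  intro visited map j _
  unfold Spec_dfs
  exact dfs_spec_main visited map j
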